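-- pv_equiv track=rewrite | github.com/biern/check.js | src/checkjs/merger.py | check_circular
-- ===== SOURCE A (Python) =====
-- def check_circular(files):
--     circular = set()
--
--     def recur(root, bases=[]):
--         if root in bases:
--             path = tuple(bases + [root])
--             for c in circular:
--                 if set(c) == set(path):
--                     break
--             else:
--                 circular.add(path)
--
--             return
--
--         for dep in files.get(root, []):
--             recur(dep, bases + [root])
--
--     for base in files:
--         for node in files[base]:
--             recur(node, [base])
--
--     return circular
-- ===== SOURCE B (Python) =====
-- def check_circular(files):
--     # Explicit-stack DFS (no recursion); cycles deduplicated by a dict keyed by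
--     # the canonical sorted node-set, so the per-cycle membership scan disappears.
--     found = {}
--     stack = []
--     for base in reversed(list(files)):
--         for node in reversed(files[base]):
--             stack.append((node, [base]))
--     while stack:
--         node, path = stack.pop()
--         if node in path:
--             cycle = path + [node]
--             key = tuple(sorted(set(cycle)))
--             if key not in found:
--                 found[key] = tuple(cycle)
--         else:
--             for dep in reversed(files.get(node, [])):
--                 stack.append((dep, path + [node]))
--     return set(found.values())
-- ===== Notes on version B (the rewrite author's own statement) =====
-- stated objective: alternative
-- what changed: B replaces A's recursive closure with an explicit stack-based DFS (children pushed in reverse so pop order matches A's visitation) and replaces A's linear scan comparing set(c)==set(path) against every stored cycle with a dict keyed by the canonical sorted node-set, so the inner scan over stored cycles disappears.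
import Mathlib
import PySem

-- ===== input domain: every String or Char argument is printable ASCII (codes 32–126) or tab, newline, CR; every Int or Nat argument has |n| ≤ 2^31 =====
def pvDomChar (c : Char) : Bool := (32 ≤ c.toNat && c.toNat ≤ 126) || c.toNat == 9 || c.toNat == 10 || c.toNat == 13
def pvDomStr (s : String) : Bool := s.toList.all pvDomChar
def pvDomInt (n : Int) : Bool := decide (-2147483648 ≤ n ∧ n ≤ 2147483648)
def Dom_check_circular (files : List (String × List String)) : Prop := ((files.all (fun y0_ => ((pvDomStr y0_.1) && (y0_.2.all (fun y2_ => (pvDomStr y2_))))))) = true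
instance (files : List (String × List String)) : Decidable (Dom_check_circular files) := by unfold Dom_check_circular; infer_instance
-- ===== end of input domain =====

-- B replaces A's recursive closure with an explicit stack-based DFS (children pushed in
-- reverse so pop order equals A's visitation order) and deduplicates cycles through a dict
-- keyed by the canonical sorted node-set instead of A's scan over all stored cycles.

-- shared primitive: Python's `files.get(root, [])` (first match; keys unique under Pre_)
def pvGet (files : List (String × List String)) (k : String) : List String :=
  ((files.find? (fun kv => kv.1 == k)).map Prod.snd).getD []

-- ===== PORT A =====
-- Python's `set(c) == set(path)` on two string tuples
def pvSetEq (c p : List String) : Bool := c.all (fun x => p.contains x) && p.all (fun x => c.contains x)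

-- fuel only makes the recursion total; it never runs out on calls the program makes
-- (depth is bounded by the number of distinct node names, < the fuel used below).
def recurA (files : List (String × List String)) (fuel : Nat) (root : String)
    (bases : List String) (circ : List (List String)) : List (List String) :=
  match fuel with
  | 0 => circ
  | fuel + 1 =>
    if root ∈ bases then
      let path := bases ++ [root]
      if circ.any (fun c => pvSetEq c path) then circ else circ ++ [path]
    else
      (pvGet files root).foldl (fun acc dep => recurA files fuel dep (bases ++ [root]) acc) circ

def check_circular (files : List (String × List String)) : List (List String) :=
  let fuel := (files.flatMap (fun kv => kv.1 :: kv.2)).length + 2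
  files.foldl (fun circ kv => kv.2.foldl (fun c node => recurA files fuel node [kv.1] c) circ) []

-- ===== PORT B =====
-- Python's `tuple(sorted(set(p)))`: the canonical form of a cycle's node-set
def canonB (p : List String) : List String :=
  PySem.List.sorted (PySem.Set.ofList p) (fun x => x) false

-- needed by runB's termination measure: files.get(_) is one of the dependency lists
theorem pvGet_len_le (files : List (String × List String)) (k : String) :
    (pvGet files k).length ≤ (files.flatMap (fun kv => kv.1 :: kv.2)).length := by
  unfold pvGet
  cases hf : files.find? (fun kv => kv.1 == k) with
  | none => simp
  | some kv =>
    have hm : kv ∈ files := List.mem_of_find?_eq_some hf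
    have h1 : (kv.1 :: kv.2).length ≤ (files.map (fun kv => (kv.1 :: kv.2).length)).sum := by
      exact List.single_le_sum (fun x _ => Nat.zero_le x) _ (List.mem_map_of_mem hm)
    simpa [List.length_flatMap] using le_trans (by simp) h1

-- the while-stack loop of Source B; frames carry fuel, the same totality device as recurA
-- (pushing the reversed dependency list one by one = the list, in order, on top of the stack).
def runB (files : List (String × List String)) :
    List (Nat × String × List String) → PySem.Dict (List String) (List String) →
    PySem.Dict (List String) (List String)
  | [], found => found
  | (0, _, _) :: rest, found => runB files rest found
  | (fuel + 1, node, path) :: rest, found =>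
    if node ∈ path then
      let cycle := path ++ [node]
      let key := canonB cycle
      runB files rest (if found.contains key then found else found.insert key cycle)
    else
      runB files ((pvGet files node).map (fun d => (fuel, d, path ++ [node])) ++ rest) found
  termination_by stack => (stack.map (fun fr => ((files.flatMap (fun kv => kv.1 :: kv.2)).length + 1) ^ fr.1)).sum
  decreasing_by
  · simp
  · simp
  · simp only [List.map_append, List.map_map, List.sum_append, List.map_cons, List.sum_cons]
    have hlen := pvGet_len_le files node
    set K := (files.flatMap (fun kv => kv.1 :: kv.2)).length
    have h1 : ((pvGet files node).map ((fun fr => (K + 1) ^ fr.1) ∘ fun d => (fuel, d, path ++ [node]))).sum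
        = (pvGet files node).length * (K + 1) ^ fuel := by
      simp [Function.comp_def, List.map_const']
    rw [h1]
    have hp : 0 < (K + 1) ^ fuel := Nat.pow_pos (by omega)
    have h2 : (pvGet files node).length * (K + 1) ^ fuel < (K + 1) ^ (fuel + 1) := by
      rw [pow_succ]
      nlinarith
    simp only [Nat.succ_eq_add_one] at *
    omega

def check_circular_alt (files : List (String × List String)) : List (List String) :=
  let fuel := (files.flatMap (fun kv => kv.1 :: kv.2)).length + 2
  -- seeds pushed base-by-base and node-by-node in reverse, so they pop first-to-last
  let seeds := files.flatMap (fun kv => kv.2.map (fun node => (fuel, node, [kv.1])))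
  PySem.Set.ofList (runB files seeds (PySem.Dict.mk [])).values

-- ===== PRECONDITION & SPEC =====
-- Pre_ excludes duplicate keys in the association list: a Python dict argument cannot contain them.
def Pre_check_circular (files : List (String × List String)) : Prop :=
  (files.map Prod.fst).Nodup
instance (files : List (String × List String)) : Decidable (Pre_check_circular files) := by
  unfold Pre_check_circular; infer_instance

def pvWitness_check_circular : (List (String × List String)) :=
  [("a", ["b"]), ("b", ["a", "c"])]

def Spec_check_circular (files : List (String × List String)) (out : List (List String)) : Prop := out = check_circular_alt files
instance (files : List (String × List String)) (out : List (List String)) : Decidable (Spec_check_circular files out) := by unfold Spec_check_circular; infer_instance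

-- ===== CLAIM (what is proved, stated in full; the proofs are below) =====
def Claim_equal_check_circular : Prop := ∀ (files : List (String × List String)), Dom_check_circular files → Pre_check_circular files → Spec_check_circular files (check_circular files)

-- ===== LEMMAS AND PROOFS =====

-- B's dict, as a function of A's list of stored cycles
def mapD (circ : List (List String)) : PySem.Dict (List String) (List String) :=
  PySem.Dict.mk (circ.map (fun c => (canonB c, c)))

-- Python's set(c) == set(p) is equality of the canonical sorted node-sets
theorem setEq_eq_canon (c p : List String) : pvSetEq c p = (canonB c == canonB p) := by
  rw [Bool.eq_iff_iff, beq_iff_eq]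
  unfold pvSetEq canonB
  rw [PySem.List.sorted_id_eq_sorted_id_iff_perm,
    List.perm_ext_iff_of_nodup (PySem.Set.nodup_ofList _) (PySem.Set.nodup_ofList _)]
  simp only [Bool.and_eq_true, List.all_eq_true, List.contains_iff_mem, PySem.Set.mem_ofList]
  constructor
  · rintro ⟨h1, h2⟩ a; exact ⟨fun ha => h1 a ha, fun ha => h2 a ha⟩
  · intro h; exact ⟨fun a ha => (h a).1 ha, fun a ha => (h a).2 ha⟩

theorem contains_mapD (circ : List (List String)) (p : List String) :
    (mapD circ).contains (canonB p) = circ.any (fun c => pvSetEq c p) := by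
  simp only [mapD, PySem.Dict.contains, List.any_map, Function.comp_def]
  simp [setEq_eq_canon]

theorem insert_mapD (circ : List (List String)) (p : List String)
    (h : (mapD circ).contains (canonB p) = false) :
    (mapD circ).insert (canonB p) p = mapD (circ ++ [p]) := by
  apply PySem.Dict.ext
  rw [PySem.Dict.items_insert_of_not_contains _ _ h]
  simp [mapD]

theorem runB_cons (files : List (String × List String)) (fuel : Nat) :
    ∀ (root : String) (bases : List String) (rest : List (Nat × String × List String))
      (circ : List (List String)),
    runB files ((fuel, root, bases) :: rest) (mapD circ)
      = runB files rest (mapD (recurA files fuel root bases circ)) := by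
  induction fuel with
  | zero => intro root bases rest circ; rw [runB, recurA]
  | succ fuel ih =>
    intro root bases rest circ
    by_cases h : root ∈ bases
    · rw [runB, recurA]
      simp only [if_pos h]
      rw [contains_mapD]
      by_cases hc : circ.any (fun c => pvSetEq c (bases ++ [root])) = true
      · simp [hc]
      · have hc' : circ.any (fun c => pvSetEq c (bases ++ [root])) = false := by
          simpa using hc
        rw [hc']
        simp only [Bool.false_eq_true, if_false]
        rw [insert_mapD _ _ (by rw [contains_mapD]; exact hc')]
    · rw [runB, recurA]
      simp only [if_neg h]
      generalize pvGet files root = deps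
      induction deps generalizing circ with
      | nil => simp
      | cons d ds ihd =>
        simp only [List.map_cons, List.cons_append, List.foldl_cons]
        rw [ih]
        exact ihd _

theorem recurA_canon_nodup (files : List (String × List String)) (fuel : Nat) :
    ∀ (root : String) (bases : List String) (circ : List (List String)),
    (circ.map canonB).Nodup → ((recurA files fuel root bases circ).map canonB).Nodup := by
  induction fuel with
  | zero => intro root bases circ h; rw [recurA]; exact h
  | succ fuel ih =>
    intro root bases circ h
    rw [recurA]
    by_cases hr : root ∈ bases
    · simp only [if_pos hr]
      by_cases hc : (circ.any fun c => pvSetEq c (bases ++ [root])) = true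
      · simp only [if_pos hc]; exact h
      · have hc' : ∀ x ∈ circ, pvSetEq x (bases ++ [root]) = false := by simpa using hc
        simp only [if_neg hc, List.map_append, List.map_cons, List.map_nil]
        rw [List.nodup_append]
        refine ⟨h, List.nodup_singleton _, ?_⟩
        intro a ha b hb
        simp only [List.mem_singleton] at hb
        subst hb
        obtain ⟨c, hcmem, rfl⟩ := List.mem_map.mp ha
        have hcx := hc' c hcmem
        rw [setEq_eq_canon] at hcx
        simp only [beq_eq_false_iff_ne, ne_eq] at hcx
        exact hcx
    · simp only [if_neg hr]
      have inner : ∀ (deps : List String) (circ : List (List String)), (circ.map canonB).Nodup →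
          ((deps.foldl (fun acc dep => recurA files fuel dep (bases ++ [root]) acc) circ).map canonB).Nodup := by
        intro deps
        induction deps with
        | nil => intro circ h'; exact h'
        | cons d ds ihd => intro circ h'; exact ihd _ (ih _ _ _ h')
      exact inner _ _ h

theorem outer_fold (files : List (String × List String)) (fuel : Nat) :
    ∀ (l : List (String × List String)) (rest : List (Nat × String × List String))
      (circ : List (List String)),
    runB files (l.flatMap (fun kv => kv.2.map (fun node => (fuel, node, [kv.1]))) ++ rest) (mapD circ)
      = runB files rest
          (mapD (l.foldl (fun circ kv => kv.2.foldl (fun c node => recurA files fuel node [kv.1] c) circ) circ)) := by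
  intro l
  induction l with
  | nil => intro rest circ; simp
  | cons kv t iht =>
    intro rest circ
    simp only [List.flatMap_cons, List.foldl_cons, List.append_assoc]
    have inner : ∀ (nodes : List String) (rest' : List (Nat × String × List String))
        (circ' : List (List String)),
        runB files (nodes.map (fun node => (fuel, node, [kv.1])) ++ rest') (mapD circ')
          = runB files rest' (mapD (nodes.foldl (fun c node => recurA files fuel node [kv.1] c) circ')) := by
      intro nodes
      induction nodes with
      | nil => intro rest' circ'; simp
      | cons n ns ihn =>
        intro rest' circ'
        simp only [List.map_cons, List.cons_append, List.foldl_cons]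
        rw [runB_cons]
        exact ihn _ _
    rw [inner]
    exact iht _ _

theorem fold_canon_nodup (files : List (String × List String)) (fuel : Nat)
    (l : List (String × List String)) :
    ∀ (circ : List (List String)), (circ.map canonB).Nodup →
    ((l.foldl (fun circ kv => kv.2.foldl (fun c node => recurA files fuel node [kv.1] c) circ) circ).map canonB).Nodup := by
  induction l with
  | nil => intro circ h; exact h
  | cons kv t iht =>
    intro circ h
    simp only [List.foldl_cons]
    apply iht
    have inner : ∀ (nodes : List String) (circ' : List (List String)),
        (circ'.map canonB).Nodup →
        ((nodes.foldl (fun c node => recurA files fuel node [kv.1] c) circ').map canonB).Nodup := by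
      intro nodes
      induction nodes with
      | nil => intro circ' h'; exact h'
      | cons n ns ihn =>
        intro circ' h'
        exact ihn _ (recurA_canon_nodup files fuel _ _ _ h')
    exact inner _ _ h

theorem values_mapD (circ : List (List String)) : (mapD circ).values = circ := by
  simp [mapD, PySem.Dict.values, Function.comp_def]

-- ===== VERDICT =====
theorem check_circular_spec : Claim_equal_check_circular := by
  intro files _ _
  unfold Spec_check_circular check_circular check_circular_alt
  dsimp only
  generalize (files.flatMap (fun kv => kv.1 :: kv.2)).length + 2 = fuel
  have h0 : ∀ d, runB files [] d = d := fun d => by rw [runB]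
  have h := outer_fold files fuel files [] []
  simp only [List.append_nil, h0] at h
  rw [show PySem.Dict.mk ([] : List (List String × List String)) = mapD [] from rfl, h, values_mapD]
  have hnd := fold_canon_nodup files fuel files [] (by simp)
  exact (PySem.Set.ofList_eq_self_of_nodup _ (List.Nodup.of_map canonB hnd)).symm
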